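-- pv_equiv track=rewrite | github.com/Affiliat0r/dutch-freelance-automation | services/llm_service_1step.py | categorize_from_data
-- ===== SOURCE A (Python) =====
-- from typing import Dict, List, Optional, Any
--
-- def categorize_from_data(receipt_data: Dict) -> str:
--     """
--     Categorize expense based on vendor and items.
--
--     Args:
--         receipt_data: Extracted receipt data
--
--     Returns:
--         Category name
--     """
--     vendor = (receipt_data.get('vendor_name', '') or '').lower()
--     items = receipt_data.get('items', [])
--
--     # Simple rule-based categorization
--     if any(name in vendor for name in ['albert heijn', 'jumbo', 'lidl', 'aldi', 'plus']):
--         return 'Representatiekosten - Type 1 (Supermarket)'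
--     elif any(name in vendor for name in ['restaurant', 'cafe', 'coffee', 'koffie']):
--         return 'Representatiekosten - Type 2 (Horeca)'
--     elif any(name in vendor for name in ['shell', 'esso', 'bp', 'tank']):
--         return 'Vervoerskosten'
--     elif any(name in vendor for name in ['staples', 'office', 'kantoor']):
--         return 'Kantoorkosten'
--     elif any(name in vendor for name in ['bol.com', 'coolblue', 'mediamarkt']):
--         return 'Beroepskosten'
--     else:
--         return 'Kantoorkosten'  # Default
-- ===== SOURCE B (Python) =====
-- KEYWORD_RANK = {
--     'albert heijn': 0, 'jumbo': 0, 'lidl': 0, 'aldi': 0, 'plus': 0,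
--     'restaurant': 1, 'cafe': 1, 'coffee': 1, 'koffie': 1,
--     'shell': 2, 'esso': 2, 'bp': 2, 'tank': 2,
--     'staples': 3, 'office': 3, 'kantoor': 3,
--     'bol.com': 4, 'coolblue': 4, 'mediamarkt': 4,
-- }
--
-- CATEGORIES = [
--     'Representatiekosten - Type 1 (Supermarket)',
--     'Representatiekosten - Type 2 (Horeca)',
--     'Vervoerskosten',
--     'Kantoorkosten',
--     'Beroepskosten',
-- ]
--
-- def categorize_from_data(receipt_data):
--     vendor = (receipt_data.get('vendor_name', '') or '').lower()
--     hits = [rank for kw, rank in KEYWORD_RANK.items() if kw in vendor]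
--     return CATEGORIES[min(hits)] if hits else 'Kantoorkosten'
-- ===== Notes on version B (the rewrite author's own statement) =====
-- stated objective: alternative
-- what changed: Instead of A's ordered if/elif first-match chain, B flattens the keywords into a keyword->priority dict, collects the priorities of ALL keywords occurring in the vendor string in one comprehension (no short-circuit), and indexes a category array with the minimum collected priority.
import Mathlib
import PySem

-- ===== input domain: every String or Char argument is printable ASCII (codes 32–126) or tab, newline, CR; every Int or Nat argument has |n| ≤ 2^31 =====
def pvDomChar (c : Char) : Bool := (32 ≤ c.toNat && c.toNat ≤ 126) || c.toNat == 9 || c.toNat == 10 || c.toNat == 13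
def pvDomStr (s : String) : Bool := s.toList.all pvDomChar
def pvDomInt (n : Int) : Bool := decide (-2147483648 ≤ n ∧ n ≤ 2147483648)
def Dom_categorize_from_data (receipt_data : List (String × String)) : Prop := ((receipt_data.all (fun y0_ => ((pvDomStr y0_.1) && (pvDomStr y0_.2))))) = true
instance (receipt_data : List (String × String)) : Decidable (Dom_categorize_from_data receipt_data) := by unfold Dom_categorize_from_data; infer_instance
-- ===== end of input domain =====

-- B replaces A's if/elif first-match chain by collecting the priorities of ALL matching
-- keywords from a flat keyword->priority dict and indexing a category array with the minimum
-- (alternative decomposition, same cost).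

-- ===== PORT A =====
-- (receipt_data.get('vendor_name','') or '') on a str value equals the value itself, since '' or '' == ''.
def categorize_from_data (receipt_data : List (String × String)) : String :=
  let vendor := PySem.Str.lower (PySem.Dict.getD (PySem.Dict.mk receipt_data) "vendor_name" "")
  let _items := PySem.Dict.get? (PySem.Dict.mk receipt_data) "items"  -- items read but unused in A
  if ["albert heijn", "jumbo", "lidl", "aldi", "plus"].any (fun name => PySem.Str.isIn name vendor) then
    "Representatiekosten - Type 1 (Supermarket)"
  else if ["restaurant", "cafe", "coffee", "koffie"].any (fun name => PySem.Str.isIn name vendor) then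
    "Representatiekosten - Type 2 (Horeca)"
  else if ["shell", "esso", "bp", "tank"].any (fun name => PySem.Str.isIn name vendor) then
    "Vervoerskosten"
  else if ["staples", "office", "kantoor"].any (fun name => PySem.Str.isIn name vendor) then
    "Kantoorkosten"
  else if ["bol.com", "coolblue", "mediamarkt"].any (fun name => PySem.Str.isIn name vendor) then
    "Beroepskosten"
  else
    "Kantoorkosten"

-- ===== PORT B =====
-- KEYWORD_RANK.items() of Source B, in insertion order
def pvKeywordRank : List (String × Int) :=
  [("albert heijn", 0), ("jumbo", 0), ("lidl", 0), ("aldi", 0), ("plus", 0),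
   ("restaurant", 1), ("cafe", 1), ("coffee", 1), ("koffie", 1),
   ("shell", 2), ("esso", 2), ("bp", 2), ("tank", 2),
   ("staples", 3), ("office", 3), ("kantoor", 3),
   ("bol.com", 4), ("coolblue", 4), ("mediamarkt", 4)]

def pvCategories : List String :=
  ["Representatiekosten - Type 1 (Supermarket)",
   "Representatiekosten - Type 2 (Horeca)",
   "Vervoerskosten",
   "Kantoorkosten",
   "Beroepskosten"]

-- 'CATEGORIES[min(hits)] if hits else default'; min on an empty list ↔ the none branch; the
-- .getD arm of pyGet? is unreachable (min(hits) is always a valid index, see the lemmas).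
def categorize_from_data_alt (receipt_data : List (String × String)) : String :=
  let vendor := PySem.Str.lower (PySem.Dict.getD (PySem.Dict.mk receipt_data) "vendor_name" "")
  let hits := pvKeywordRank.filterMap (fun p => if PySem.Str.isIn p.1 vendor then some p.2 else none)
  match PySem.List.min? hits (fun x => x) with
  | some m => (PySem.List.pyGet? pvCategories m).getD "Kantoorkosten"
  | none => "Kantoorkosten"

-- ===== PRECONDITION & SPEC =====
def Spec_categorize_from_data (receipt_data : List (String × String)) (out : String) : Prop := out = categorize_from_data_alt receipt_data
instance (receipt_data : List (String × String)) (out : String) : Decidable (Spec_categorize_from_data receipt_data out) := by unfold Spec_categorize_from_data; infer_instance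

-- ===== CLAIM (what is proved, stated in full; the proofs are below) =====
def Claim_equal_categorize_from_data : Prop := ∀ (receipt_data : List (String × String)), Dom_categorize_from_data receipt_data → Spec_categorize_from_data receipt_data (categorize_from_data receipt_data)

-- ===== LEMMAS AND PROOFS =====

-- the five keyword groups, in A's branch order (proof-side names)
def pvG0 : List String := ["albert heijn", "jumbo", "lidl", "aldi", "plus"]
def pvG1 : List String := ["restaurant", "cafe", "coffee", "koffie"]
def pvG2 : List String := ["shell", "esso", "bp", "tank"]
def pvG3 : List String := ["staples", "office", "kantoor"]
def pvG4 : List String := ["bol.com", "coolblue", "mediamarkt"]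

-- one group's contribution to the hits list
theorem mem_fm (g : List String) (r : Int) (v : String) (x : Int) :
    (x ∈ g.filterMap (fun k => if PySem.Str.isIn k v then some r else none)) ↔
      (x = r ∧ (g.any (fun n => PySem.Str.isIn n v)) = true) := by
  simp only [List.mem_filterMap, List.any_eq_true]
  constructor
  · rintro ⟨a, ha, hif⟩
    by_cases hc : PySem.Str.isIn a v = true
    · rw [if_pos hc] at hif; cases hif; exact ⟨rfl, a, ha, hc⟩
    · rw [if_neg hc] at hif; cases hif
  · rintro ⟨hx, a, ha, hc⟩
    exact ⟨a, ha, by rw [if_pos hc, hx]⟩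

-- the flat dict is the concatenation of the five groups with their ranks
set_option maxHeartbeats 1000000 in
theorem hits_split (v : String) :
    pvKeywordRank.filterMap (fun p => if PySem.Str.isIn p.1 v then some p.2 else none) =
      pvG0.filterMap (fun k => if PySem.Str.isIn k v then some (0 : Int) else none) ++
      pvG1.filterMap (fun k => if PySem.Str.isIn k v then some (1 : Int) else none) ++
      pvG2.filterMap (fun k => if PySem.Str.isIn k v then some (2 : Int) else none) ++
      pvG3.filterMap (fun k => if PySem.Str.isIn k v then some (3 : Int) else none) ++
      pvG4.filterMap (fun k => if PySem.Str.isIn k v then some (4 : Int) else none) := by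
  have h : pvKeywordRank =
      pvG0.map (fun k => (k, (0 : Int))) ++ pvG1.map (fun k => (k, (1 : Int))) ++
      pvG2.map (fun k => (k, (2 : Int))) ++ pvG3.map (fun k => (k, (3 : Int))) ++
      pvG4.map (fun k => (k, (4 : Int))) := rfl
  rw [h]
  simp only [List.filterMap_append, List.filterMap_map]
  rfl

-- membership in the hits list, by group
set_option maxHeartbeats 1000000 in
theorem mem_hits_iff (v : String) (x : Int) :
    (x ∈ pvKeywordRank.filterMap (fun p => if PySem.Str.isIn p.1 v then some p.2 else none)) ↔
      (x = 0 ∧ (pvG0.any (fun n => PySem.Str.isIn n v)) = true) ∨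
      (x = 1 ∧ (pvG1.any (fun n => PySem.Str.isIn n v)) = true) ∨
      (x = 2 ∧ (pvG2.any (fun n => PySem.Str.isIn n v)) = true) ∨
      (x = 3 ∧ (pvG3.any (fun n => PySem.Str.isIn n v)) = true) ∨
      (x = 4 ∧ (pvG4.any (fun n => PySem.Str.isIn n v)) = true) := by
  rw [hits_split]
  simp only [List.mem_append, mem_fm]
  tauto

set_option maxHeartbeats 1000000 in
theorem categorize_eq (receipt_data : List (String × String)) :
    categorize_from_data receipt_data = categorize_from_data_alt receipt_data := by
  unfold categorize_from_data categorize_from_data_alt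
  simp only []
  set v := PySem.Str.lower (PySem.Dict.getD (PySem.Dict.mk receipt_data) "vendor_name" "") with hv
  set hits := pvKeywordRank.filterMap (fun p => if PySem.Str.isIn p.1 v then some p.2 else none) with hh
  have hmem : ∀ x : Int, x ∈ hits ↔ _ := fun x => mem_hits_iff v x
  cases hm : PySem.List.min? hits (fun x => x) with
  | none =>
      have hnil : hits = [] := (PySem.List.min?_eq_none_iff _ _).1 hm
      have g0 : ¬ (pvG0.any (fun n => PySem.Str.isIn n v)) = true := by
        intro hc; exact (List.not_mem_nil (a := (0:Int))) (hnil ▸ (hmem 0).2 (Or.inl ⟨rfl, hc⟩))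
      have g1 : ¬ (pvG1.any (fun n => PySem.Str.isIn n v)) = true := by
        intro hc; exact (List.not_mem_nil (a := (1:Int))) (hnil ▸ (hmem 1).2 (Or.inr (Or.inl ⟨rfl, hc⟩)))
      have g2 : ¬ (pvG2.any (fun n => PySem.Str.isIn n v)) = true := by
        intro hc; exact (List.not_mem_nil (a := (2:Int))) (hnil ▸ (hmem 2).2 (Or.inr (Or.inr (Or.inl ⟨rfl, hc⟩))))
      have g3 : ¬ (pvG3.any (fun n => PySem.Str.isIn n v)) = true := by
        intro hc; exact (List.not_mem_nil (a := (3:Int))) (hnil ▸ (hmem 3).2 (Or.inr (Or.inr (Or.inr (Or.inl ⟨rfl, hc⟩)))))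
      have g4 : ¬ (pvG4.any (fun n => PySem.Str.isIn n v)) = true := by
        intro hc; exact (List.not_mem_nil (a := (4:Int))) (hnil ▸ (hmem 4).2 (Or.inr (Or.inr (Or.inr (Or.inr ⟨rfl, hc⟩)))))
      simp only [pvG0, pvG1, pvG2, pvG3, pvG4] at g0 g1 g2 g3 g4
      rw [if_neg g0, if_neg g1, if_neg g2, if_neg g3, if_neg g4]
  | some m =>
      have hmmem : m ∈ hits := PySem.List.min?_mem hm
      have hmin : ∀ y ∈ hits, m ≤ y := fun y hy => PySem.List.min?_isMin hm y hy
      simp only [pvG0, pvG1, pvG2, pvG3, pvG4] at hmem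
      split_ifs with h1 h2 h3 h4 h5
      · have h0 : (0 : Int) ∈ hits := (hmem 0).2 (Or.inl ⟨rfl, h1⟩)
        have hle : m ≤ 0 := hmin 0 h0
        have hge : 0 ≤ m := by
          rcases (hmem m).1 hmmem with ⟨h,_⟩|⟨h,_⟩|⟨h,_⟩|⟨h,_⟩|⟨h,_⟩ <;> omega
        have hm0 : m = 0 := le_antisymm hle hge
        rw [hm0]; rfl
      · have h0 : (1 : Int) ∈ hits := (hmem 1).2 (Or.inr (Or.inl ⟨rfl, h2⟩))
        have hle : m ≤ 1 := hmin 1 h0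
        have hge : 1 ≤ m := by
          rcases (hmem m).1 hmmem with ⟨h,hc⟩|⟨h,_⟩|⟨h,_⟩|⟨h,_⟩|⟨h,_⟩
          · exact absurd hc h1
          all_goals omega
        have hm0 : m = 1 := le_antisymm hle hge
        rw [hm0]; rfl
      · have h0 : (2 : Int) ∈ hits := (hmem 2).2 (Or.inr (Or.inr (Or.inl ⟨rfl, h3⟩)))
        have hle : m ≤ 2 := hmin 2 h0
        have hge : 2 ≤ m := by
          rcases (hmem m).1 hmmem with ⟨h,hc⟩|⟨h,hc⟩|⟨h,_⟩|⟨h,_⟩|⟨h,_⟩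
          · exact absurd hc h1
          · exact absurd hc h2
          all_goals omega
        have hm0 : m = 2 := le_antisymm hle hge
        rw [hm0]; rfl
      · have h0 : (3 : Int) ∈ hits := (hmem 3).2 (Or.inr (Or.inr (Or.inr (Or.inl ⟨rfl, h4⟩))))
        have hle : m ≤ 3 := hmin 3 h0
        have hge : 3 ≤ m := by
          rcases (hmem m).1 hmmem with ⟨h,hc⟩|⟨h,hc⟩|⟨h,hc⟩|⟨h,_⟩|⟨h,_⟩
          · exact absurd hc h1
          · exact absurd hc h2
          · exact absurd hc h3
          all_goals omega
        have hm0 : m = 3 := le_antisymm hle hge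
        rw [hm0]; rfl
      · have h0 : (4 : Int) ∈ hits := (hmem 4).2 (Or.inr (Or.inr (Or.inr (Or.inr ⟨rfl, h5⟩))))
        have hle : m ≤ 4 := hmin 4 h0
        have hge : 4 ≤ m := by
          rcases (hmem m).1 hmmem with ⟨h,hc⟩|⟨h,hc⟩|⟨h,hc⟩|⟨h,hc⟩|⟨h,_⟩
          · exact absurd hc h1
          · exact absurd hc h2
          · exact absurd hc h3
          · exact absurd hc h4
          all_goals omega
        have hm0 : m = 4 := le_antisymm hle hge
        rw [hm0]; rfl
      · exfalso
        rcases (hmem m).1 hmmem with ⟨_,hc⟩|⟨_,hc⟩|⟨_,hc⟩|⟨_,hc⟩|⟨_,hc⟩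
        · exact absurd hc h1
        · exact absurd hc h2
        · exact absurd hc h3
        · exact absurd hc h4
        · exact absurd hc h5

-- ===== VERDICT (by name: the statement is the Claim_ definition above) =====
theorem categorize_from_data_spec : Claim_equal_categorize_from_data := by
  intro rd _
  exact categorize_eq rd
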